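-- pv_equiv track=rewrite | github.com/vilajp/informatorio | funciones.py | es_entero
-- ===== SOURCE A (Python) =====
-- def es_entero(string):
--     string = string.strip()
--     orden = 0
--     for cada_letra in string:
--         if orden == 0 and cada_letra in "-+":
--             orden += 1
--             continue
--         elif cada_letra in "01234567890":
--             continue
--         else:
--             return False
--     return True
-- ===== SOURCE B (Python) =====
-- def es_entero(string):
--     s = string.strip()
--     signs = sum(1 for c in s if c in '+-')
--     digits_ok = all(c in '0123456789' for c in s if c not in '+-')
--     return signs <= 1 and digits_ok
-- ===== Notes on version B (the rewrite author's own statement) =====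
-- stated objective: simpler
-- what changed: Replaces the stateful single-pass scan by a stateless count-then-validate decomposition: count sign characters, check all non-sign characters are digits, return signs<=1 and digits_ok.
import Mathlib
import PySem

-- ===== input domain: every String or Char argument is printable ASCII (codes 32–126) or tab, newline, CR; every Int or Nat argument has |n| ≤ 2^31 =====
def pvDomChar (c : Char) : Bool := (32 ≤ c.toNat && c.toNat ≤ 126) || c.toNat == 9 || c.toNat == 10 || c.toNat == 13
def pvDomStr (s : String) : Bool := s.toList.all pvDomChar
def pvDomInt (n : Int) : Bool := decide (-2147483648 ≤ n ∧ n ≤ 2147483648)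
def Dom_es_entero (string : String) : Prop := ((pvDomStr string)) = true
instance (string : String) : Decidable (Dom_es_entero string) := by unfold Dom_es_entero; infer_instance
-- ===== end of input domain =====

-- B replaces A's stateful scan (a flag gating the sign branch) by a stateless
-- count-then-validate decomposition (count signs; all non-signs are digits); simpler, not faster.


-- ===== PORT A =====
-- the scan loop of A, with its sign-flag state
def esEnteroLoopA : List Char → Nat → Bool
  | [], _ => true
  | c :: rest, orden =>
    if orden == 0 && (c == '-' || c == '+') then esEnteroLoopA rest (orden + 1)
    else if ['0','1','2','3','4','5','6','7','8','9','0'].contains c then esEnteroLoopA rest orden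
    else false

def es_entero (string : String) : Bool :=
  esEnteroLoopA (PySem.Str.strip string).toList 0

-- ===== PORT B =====
def es_entero_alt (string : String) : Bool :=
  let s := (PySem.Str.strip string).toList
  let signs := (s.filter (fun c => c == '+' || c == '-')).length
  let digits_ok := (s.filter (fun c => !(c == '+' || c == '-'))).all
      (fun c => ['0','1','2','3','4','5','6','7','8','9'].contains c)
  decide (signs ≤ 1) && digits_ok

-- ===== PRECONDITION & SPEC =====
def Spec_es_entero (string : String) (out : Bool) : Prop := out = es_entero_alt string
instance (string : String) (out : Bool) : Decidable (Spec_es_entero string out) := by unfold Spec_es_entero; infer_instance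

-- ===== CLAIM (what is proved, stated in full; the proofs are below) =====
def Claim_equal_es_entero : Prop := ∀ (string : String), Dom_es_entero string → Spec_es_entero string (es_entero string)

-- ===== LEMMAS AND PROOFS =====
-- the duplicated '0' in A's digit literal is harmless
theorem contains_eleven (c : Char) :
    (['0','1','2','3','4','5','6','7','8','9','0'].contains c)
      = (['0','1','2','3','4','5','6','7','8','9'].contains c) := by
  by_cases h : c = '0'
  · subst h; decide
  · have h0 : (c == '0') = false := by simpa using h
    simp [List.contains_cons, h]

-- loop invariant: A's scan equals "remaining signs + signs so far ≤ 1 and all remaining non-signs are digits"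
theorem esEnteroLoopA_eq (l : List Char) (orden : Nat) (h : orden ≤ 1) :
    esEnteroLoopA l orden =
      (decide ((l.filter (fun c => c == '+' || c == '-')).length + orden ≤ 1) &&
       (l.filter (fun c => !(c == '+' || c == '-'))).all
         (fun c => ['0','1','2','3','4','5','6','7','8','9'].contains c)) := by
  induction l generalizing orden with
  | nil => simpa [esEnteroLoopA] using h
  | cons c rest ih =>
    by_cases hs : c = '+' ∨ c = '-'
    · have hsb : ((fun c => c == '+' || c == '-') c) = true := by
        rcases hs with rfl | rfl <;> decide
      have hsbA : (c == '-' || c == '+') = true := by rcases hs with rfl | rfl <;> decide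
      have hd : (['0','1','2','3','4','5','6','7','8','9','0'].contains c) = false := by
        rcases hs with rfl | rfl <;> decide
      have e1 : (c :: rest).filter (fun c => c == '+' || c == '-')
          = c :: rest.filter (fun c => c == '+' || c == '-') := by
        rw [List.filter_cons, if_pos hsb]
      have e2 : (c :: rest).filter (fun c => !(c == '+' || c == '-'))
          = rest.filter (fun c => !(c == '+' || c == '-')) := by
        rw [List.filter_cons, if_neg (by simp [hsb])]
      rcases Nat.le_one_iff_eq_zero_or_eq_one.mp h with rfl | rfl
      · simp only [esEnteroLoopA]
        rw [if_pos (by simp [hsbA]), ih 1 (by omega), e1, e2]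
        simp
      · simp only [esEnteroLoopA]
        rw [if_neg (by simp), if_neg (by rw [hd]; exact Bool.false_ne_true), e1, e2]
        have hn : ¬ ((rest.filter (fun c => c == '+' || c == '-')).length + 1 + 1 ≤ 1) := by
          omega
        simp [hn]
    · push_neg at hs
      have hsb : ((fun c => c == '+' || c == '-') c) = false := by
        simp only [Bool.or_eq_false_iff, beq_eq_false_iff_ne]; exact hs
      have e1 : (c :: rest).filter (fun c => c == '+' || c == '-')
          = rest.filter (fun c => c == '+' || c == '-') := by
        rw [List.filter_cons, if_neg (by simp [hsb])]
      have e2 : (c :: rest).filter (fun c => !(c == '+' || c == '-'))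
          = c :: rest.filter (fun c => !(c == '+' || c == '-')) := by
        rw [List.filter_cons, if_pos (by simp [hsb])]
      simp only [esEnteroLoopA]
      rw [if_neg (by simp [beq_eq_false_iff_ne, hs.1, hs.2]), e1, e2]
      by_cases hd : (['0','1','2','3','4','5','6','7','8','9','0'].contains c) = true
      · rw [if_pos hd, ih orden h]
        rw [contains_eleven] at hd
        simp only [List.all_cons, hd, Bool.true_and]
      · rw [if_neg hd]
        rw [contains_eleven] at hd
        simp only [Bool.not_eq_true] at hd
        simp only [List.all_cons, hd, Bool.false_and, Bool.and_false]

-- ===== VERDICT (by name: the statement is the Claim_ definition above) =====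
theorem es_entero_spec : Claim_equal_es_entero := by
  intro s _
  unfold Spec_es_entero es_entero es_entero_alt
  simp [esEnteroLoopA_eq _ 0 (by omega)]
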